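-- pv_equiv track=rewrite | github.com/Redelyx/Quantum_Leader_Election | utils.py | greatest_power_of_two
-- ===== SOURCE A (Python) =====
-- def greatest_power_of_two(n):
--     if n < 1:
--         return None  # Error: n should be a positive integer
--     power = 1
--     while n >= 2:
--         n //= 2
--         power *= 2
--     return power
-- ===== SOURCE B (Python) =====
-- def greatest_power_of_two(n):
--     if n < 1:
--         return None  # Error: n should be a positive integer
--     k = int(n).bit_length() - 1
--     return 1 << k
-- ===== Notes on version B (the rewrite author's own statement) =====
-- stated objective: idiomatic
-- what changed: Replaces the halving/doubling loop with a closed-form bit_length computation and a single shift.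
import Mathlib
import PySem

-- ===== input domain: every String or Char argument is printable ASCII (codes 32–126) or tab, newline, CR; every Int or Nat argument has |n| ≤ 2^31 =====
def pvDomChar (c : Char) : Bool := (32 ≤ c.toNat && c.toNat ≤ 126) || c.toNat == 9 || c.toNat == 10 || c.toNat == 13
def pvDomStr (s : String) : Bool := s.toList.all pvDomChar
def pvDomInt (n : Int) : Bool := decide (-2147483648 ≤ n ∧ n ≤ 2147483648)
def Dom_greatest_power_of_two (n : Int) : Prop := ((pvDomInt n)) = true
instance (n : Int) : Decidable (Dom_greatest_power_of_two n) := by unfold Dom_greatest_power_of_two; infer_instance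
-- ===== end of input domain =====

-- ===== PORT A =====
-- A: repeated halving of n, doubling `power`, until n < 2.
def gptLoop (n power : Int) : Int :=
  if 2 ≤ n then gptLoop (PySem.Int.floordiv n 2) (power * 2) else power
termination_by n.toNat
decreasing_by
  simp only [PySem.Int.floordiv] at *
  rw [Int.fdiv_eq_ediv]
  simp only [show (0:Int) ≤ 2 ∨ ((2:Int) ∣ n) ↔ True from by simp, if_true]
  omega

def greatest_power_of_two (n : Int) : Option Int :=
  if n < 1 then none else some (gptLoop n 1)

-- ===== PORT B =====
-- B: closed form, 1 << (bit_length(n) - 1); Python's int.bit_length is Nat.size.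
def greatest_power_of_two_alt (n : Int) : Option Int :=
  if n < 1 then none
  else some ((((1 : Nat) <<< (Nat.size n.toNat - 1)) : Nat) : Int)

-- ===== PRECONDITION & SPEC =====
def Spec_greatest_power_of_two (n : Int) (out : Option Int) : Prop := out = greatest_power_of_two_alt n
instance (n : Int) (out : Option Int) : Decidable (Spec_greatest_power_of_two n out) := by unfold Spec_greatest_power_of_two; infer_instance

-- ===== CLAIM (what is proved, stated in full; the proofs are below) =====
def Claim_equal_greatest_power_of_two : Prop := ∀ (n : Int), Dom_greatest_power_of_two n → Spec_greatest_power_of_two n (greatest_power_of_two n)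

-- ===== LEMMAS AND PROOFS =====

theorem size_div2 (m : Nat) (h : 2 ≤ m) : Nat.size m = Nat.size (m / 2) + 1 := by
  have h1 : 1 ≤ m / 2 := by omega
  apply le_antisymm
  · rw [Nat.size_le]
    have := Nat.lt_size_self (m / 2)
    have : m / 2 + 1 ≤ 2 ^ Nat.size (m / 2) := this
    calc m < 2 * (m / 2) + 2 := by omega
      _ ≤ 2 * 2 ^ Nat.size (m / 2) := by omega
      _ = 2 ^ (Nat.size (m / 2) + 1) := by ring
  · have hpos : 0 < Nat.size (m / 2) := Nat.size_pos.mpr h1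
    have h2 : 2 ^ (Nat.size (m / 2) - 1) ≤ m / 2 := by
      rw [← Nat.lt_size]; omega
    have : Nat.size (m / 2) < Nat.size m := by
      rw [Nat.lt_size]
      have : 2 ^ Nat.size (m / 2) = 2 * 2 ^ (Nat.size (m / 2) - 1) := by
        rw [← pow_succ']; congr 1; omega
      omega
    omega

theorem gptLoop_eq (m : Nat) (h : 1 ≤ m) (p : Int) :
    gptLoop (m : Int) p = p * 2 ^ (Nat.size m - 1) := by
  induction m using Nat.strong_induction_on generalizing p with
  | _ m ih =>
    rw [gptLoop]
    by_cases h2 : 2 ≤ (m : Int)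
    · rw [if_pos h2]
      have hm2 : 2 ≤ m := by exact_mod_cast h2
      have hfd : PySem.Int.floordiv (m : Int) 2 = ((m / 2 : Nat) : Int) := by
        simp only [PySem.Int.floordiv]
        rw [Int.fdiv_eq_ediv]
        simp only [show (0:Int) ≤ 2 ∨ ((2:Int) ∣ (m:Int)) ↔ True from by simp, if_true]
        omega
      rw [hfd, ih (m / 2) (by omega) (by omega) (p * 2)]
      rw [size_div2 m hm2]
      have hpos : 0 < Nat.size (m / 2) := Nat.size_pos.mpr (by omega)
      have : Nat.size (m / 2) + 1 - 1 = (Nat.size (m / 2) - 1) + 1 := by omega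
      rw [this, pow_succ]
      ring
    · rw [if_neg h2]
      have hm1 : m = 1 := by omega
      subst hm1
      simp [Nat.size_one]

-- ===== VERDICT (by name: the statement is the Claim_ definition above) =====
theorem greatest_power_of_two_spec : Claim_equal_greatest_power_of_two := by
  intro n _
  unfold Spec_greatest_power_of_two greatest_power_of_two greatest_power_of_two_alt
  by_cases h : n < 1
  · rw [if_pos h, if_pos h]
  · rw [if_neg h, if_neg h]
    have hn : n = ((n.toNat : Nat) : Int) := by omega
    rw [hn, gptLoop_eq n.toNat (by omega) 1]
    have hmax : ((((n.toNat : Nat) : Int)).toNat : Nat) = n.toNat := by omega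
    simp only [Nat.shiftLeft_eq, one_mul, hmax, Nat.cast_pow, Nat.cast_ofNat]
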